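-- pv_equiv track=rewrite | github.com/Hanzala1234-ai/Project_Analyser | hack3 (2).py | _combine_chunk_metrics
-- ===== SOURCE A (Python) =====
-- from typing import Dict, List, Tuple, Optional, Any, Set
--
-- def _combine_chunk_metrics(chunk_metrics: List[Dict[str, Any]]) -> Dict[str, Any]:
--     """Combine metrics from multiple chunks into a single file metric"""
--     if not chunk_metrics:
--         return {}
--
--     combined = {
--         'lines_of_code': sum(m.get('lines_of_code', 0) for m in chunk_metrics),
--         'non_empty_lines': sum(m.get('non_empty_lines', 0) for m in chunk_metrics),
--         'comment_lines': sum(m.get('comment_lines', 0) for m in chunk_metrics),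
--         'class_count': sum(m.get('class_count', 0) for m in chunk_metrics),
--         'function_count': sum(m.get('function_count', 0) for m in chunk_metrics),
--         'import_count': max(m.get('import_count', 0) for m in chunk_metrics),  # Imports typically at top
--         'complexity_score': max(m.get('complexity_score', 0) for m in chunk_metrics),
--         'file_size_bytes': sum(m.get('file_size_bytes', 0) for m in chunk_metrics)
--     }
--
--     return combined
-- ===== SOURCE B (Python) =====
-- def _combine_chunk_metrics(chunk_metrics):
--     """Combine metrics from multiple chunks into a single file metric (single pass)."""
--     if not chunk_metrics:
--         return {}
--     lines_of_code = non_empty_lines = comment_lines = 0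
--     class_count = function_count = file_size_bytes = 0
--     import_count = complexity_score = None
--     for m in chunk_metrics:
--         lines_of_code += m.get('lines_of_code', 0)
--         non_empty_lines += m.get('non_empty_lines', 0)
--         comment_lines += m.get('comment_lines', 0)
--         class_count += m.get('class_count', 0)
--         function_count += m.get('function_count', 0)
--         file_size_bytes += m.get('file_size_bytes', 0)
--         v = m.get('import_count', 0)
--         import_count = v if import_count is None else max(import_count, v)
--         w = m.get('complexity_score', 0)
--         complexity_score = w if complexity_score is None else max(complexity_score, w)
--     return {
--         'lines_of_code': lines_of_code,
--         'non_empty_lines': non_empty_lines,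
--         'comment_lines': comment_lines,
--         'class_count': class_count,
--         'function_count': function_count,
--         'import_count': import_count,
--         'complexity_score': complexity_score,
--         'file_size_bytes': file_size_bytes,
--     }
-- ===== Notes on version B (the rewrite author's own statement) =====
-- stated objective: alternative
-- what changed: Replaces A's eight separate generator passes over chunk_metrics (one per metric key) by a single loop maintaining six running sums and two running maxima seeded from the first chunk's value (None-seeded, so exact for negative values).
import Mathlib
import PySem

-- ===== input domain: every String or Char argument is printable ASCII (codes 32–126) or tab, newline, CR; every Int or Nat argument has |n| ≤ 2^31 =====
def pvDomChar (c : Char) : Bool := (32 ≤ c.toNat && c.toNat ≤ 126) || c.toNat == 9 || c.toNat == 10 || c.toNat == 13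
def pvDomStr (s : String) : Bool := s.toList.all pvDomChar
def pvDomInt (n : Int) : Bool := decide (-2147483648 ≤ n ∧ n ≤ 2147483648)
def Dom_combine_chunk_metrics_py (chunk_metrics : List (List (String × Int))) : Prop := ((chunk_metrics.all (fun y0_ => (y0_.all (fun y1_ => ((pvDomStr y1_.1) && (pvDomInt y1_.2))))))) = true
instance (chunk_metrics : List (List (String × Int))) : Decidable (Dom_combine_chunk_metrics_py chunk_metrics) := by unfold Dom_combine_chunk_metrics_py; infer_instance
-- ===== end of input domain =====

-- B replaces A's eight separate generator passes over chunk_metrics by one loop with running accumulators (return value only; no mutation).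

-- shared lookup helper: Python's m.get(k, 0)
def pvGet (m : List (String × Int)) (k : String) : Int := (PySem.Dict.mk m).getD k 0

-- ===== PORT A =====
-- Python's max(<generator>); the [] branch is unreachable here (A guards chunk_metrics non-empty, so Python's ValueError never occurs)
def pvPyMax (l : List Int) : Int :=
  match l with
  | [] => 0
  | x :: xs => xs.foldl max x

def combine_chunk_metrics_py (chunk_metrics : List (List (String × Int))) : List (String × Int) :=
  if chunk_metrics = [] then []
  else
    [("lines_of_code", (chunk_metrics.map (fun m => pvGet m "lines_of_code")).sum),
     ("non_empty_lines", (chunk_metrics.map (fun m => pvGet m "non_empty_lines")).sum),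
     ("comment_lines", (chunk_metrics.map (fun m => pvGet m "comment_lines")).sum),
     ("class_count", (chunk_metrics.map (fun m => pvGet m "class_count")).sum),
     ("function_count", (chunk_metrics.map (fun m => pvGet m "function_count")).sum),
     ("import_count", pvPyMax (chunk_metrics.map (fun m => pvGet m "import_count"))),
     ("complexity_score", pvPyMax (chunk_metrics.map (fun m => pvGet m "complexity_score"))),
     ("file_size_bytes", (chunk_metrics.map (fun m => pvGet m "file_size_bytes")).sum)]

-- ===== PORT B =====
-- loop state: six running sums, two running maxima (None until the first chunk)
def pvState := Int × Int × Int × Int × Int × Int × Option Int × Option Int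

-- Python's 'v if acc is None else max(acc, v)'
def pvOptMax (o : Option Int) (v : Int) : Option Int :=
  match o with
  | none => some v
  | some x => some (max x v)

def pvStep (s : pvState) (m : List (String × Int)) : pvState :=
  match s with
  | (a, b, c, d, e, f, oi, oc) =>
    (a + pvGet m "lines_of_code",
     b + pvGet m "non_empty_lines",
     c + pvGet m "comment_lines",
     d + pvGet m "class_count",
     e + pvGet m "function_count",
     f + pvGet m "file_size_bytes",
     pvOptMax oi (pvGet m "import_count"),
     pvOptMax oc (pvGet m "complexity_score"))

def combine_chunk_metrics_py_alt (chunk_metrics : List (List (String × Int))) : List (String × Int) :=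
  match chunk_metrics with
  | [] => []
  | _ =>
    match chunk_metrics.foldl pvStep (0, 0, 0, 0, 0, 0, none, none) with
    | (a, b, c, d, e, f, oi, oc) =>
      -- oi/oc are some after at least one iteration; .getD 0 only totalises the extraction
      [("lines_of_code", a),
       ("non_empty_lines", b),
       ("comment_lines", c),
       ("class_count", d),
       ("function_count", e),
       ("import_count", oi.getD 0),
       ("complexity_score", oc.getD 0),
       ("file_size_bytes", f)]

-- ===== PRECONDITION & SPEC =====
def Spec_combine_chunk_metrics_py (chunk_metrics : List (List (String × Int))) (out : List (String × Int)) : Prop := out = combine_chunk_metrics_py_alt chunk_metrics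
instance (chunk_metrics : List (List (String × Int))) (out : List (String × Int)) : Decidable (Spec_combine_chunk_metrics_py chunk_metrics out) := by unfold Spec_combine_chunk_metrics_py; infer_instance

-- ===== CLAIM (what is proved, stated in full; the proofs are below) =====
def Claim_equal_combine_chunk_metrics_py : Prop := ∀ (chunk_metrics : List (List (String × Int))), Dom_combine_chunk_metrics_py chunk_metrics → Spec_combine_chunk_metrics_py chunk_metrics (combine_chunk_metrics_py chunk_metrics)

-- ===== LEMMAS AND PROOFS =====

-- the fold's state after processing cm, from an arbitrary starting state
theorem pvFold_spec (cm : List (List (String × Int))) (a b c d e f : Int) (oi oc : Option Int) :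
    cm.foldl pvStep (a, b, c, d, e, f, oi, oc) =
      (a + (cm.map (fun m => pvGet m "lines_of_code")).sum,
       b + (cm.map (fun m => pvGet m "non_empty_lines")).sum,
       c + (cm.map (fun m => pvGet m "comment_lines")).sum,
       d + (cm.map (fun m => pvGet m "class_count")).sum,
       e + (cm.map (fun m => pvGet m "function_count")).sum,
       f + (cm.map (fun m => pvGet m "file_size_bytes")).sum,
       (cm.map (fun m => pvGet m "import_count")).foldl pvOptMax oi,
       (cm.map (fun m => pvGet m "complexity_score")).foldl pvOptMax oc) := by
  induction cm generalizing a b c d e f oi oc with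
  | nil => simp
  | cons m rest ih =>
    simp only [List.foldl_cons, List.map_cons, List.sum_cons, pvStep, ih]
    ring_nf

-- folding pvOptMax from a some-seed is Python's running max
theorem pvOptMax_foldl_some (l : List Int) (x : Int) :
    l.foldl pvOptMax (some x) = some (l.foldl max x) := by
  induction l generalizing x with
  | nil => rfl
  | cons y ys ih => simp [pvOptMax, ih]

theorem pvOptMax_foldl_none_eq_pyMax (l : List Int) (h : l ≠ []) :
    l.foldl pvOptMax none = some (pvPyMax l) := by
  match l with
  | [] => exact absurd rfl h
  | x :: xs => simp [pvPyMax, pvOptMax, pvOptMax_foldl_some]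

-- ===== VERDICT (by name: the statement is the Claim_ definition above) =====
theorem combine_chunk_metrics_py_spec : Claim_equal_combine_chunk_metrics_py := by
  intro cm _
  unfold Spec_combine_chunk_metrics_py
  match cm with
  | [] => rfl
  | m :: rest =>
    simp only [combine_chunk_metrics_py, combine_chunk_metrics_py_alt, if_neg (by simp : ¬(m :: rest = []))]
    rw [pvFold_spec]
    rw [pvOptMax_foldl_none_eq_pyMax _ (by simp), pvOptMax_foldl_none_eq_pyMax _ (by simp)]
    simp
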